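-- pv_equiv track=rewrite | github.com/polaris64/advent-of-code | 2015/06/solve.py | follow_instrs_v2
-- ===== SOURCE A (Python) =====
-- from collections import Counter
--
-- def follow_instrs_v2(instrs):
--     grid = Counter()
--     for instr in instrs:
--         minx, miny = instr[1][0]
--         maxx, maxy = instr[1][1]
--
--         new_cells = [(x, y) for x in range(minx, maxx + 1) for y in range(miny, maxy + 1)]
--
--         # Increase brightness by 1
--         if instr[0] == "turn on":
--             for cell in new_cells:
--                 grid[cell] += 1
--
--         # Decrease brightness by 1 (minimum is 0)
--         elif instr[0] == "turn off":
--             for cell in new_cells: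
--                 grid[cell] = max(0, grid[cell] - 1)
--
--         # Increase brightness by 2
--         elif instr[0] == "toggle":
--             for cell in new_cells:
--                 grid[cell] += 2
--
--     return grid
-- ===== SOURCE B (Python) =====
-- from collections import Counter
--
-- def follow_instrs_v2(instrs):
--     # Coordinate compression: every rectangle edge starts a new stripe, so all
--     # cells of a compressed region end up with the same brightness; compute it
--     # once per region by replaying the instructions, then expand regions to cells.
--     ops = [ins for ins in instrs
--            if ins[0] in ("turn on", "turn off", "toggle")]
--
--     xs = sorted({v for _, ((ax, _), (bx, _)) in ops for v in (ax, bx + 1)})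
--     ys = sorted({v for _, ((_, ay), (_, by)) in ops for v in (ay, by + 1)})
--
--     region = {}
--     for xi in range(len(xs) - 1):
--         for yi in range(len(ys) - 1):
--             x, y = xs[xi], ys[yi]
--             v = 0
--             for op, ((ax, ay), (bx, by)) in ops:
--                 if ax <= x <= bx and ay <= y <= by:
--                     if op == "turn on":
--                         v += 1
--                     elif op == "turn off":
--                         v = max(0, v - 1)
--                     else:
--                         v += 2
--             region[(xi, yi)] = v
--
--     # Expand: the first touch of a cell writes its (already final) brightness.
--     grid = Counter()
--     for _, ((ax, ay), (bx, by)) in ops: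
--         x0, x1 = xs.index(ax), xs.index(bx + 1)
--         y0, y1 = ys.index(ay), ys.index(by + 1)
--         for xi in range(x0, x1):
--             for x in range(xs[xi], xs[xi + 1]):
--                 for yi in range(y0, y1):
--                     for y in range(ys[yi], ys[yi + 1]):
--                         if (x, y) not in grid:
--                             grid[(x, y)] = region[(xi, yi)]
--     return grid
-- ===== Notes on version B (the rewrite author's own statement) =====
-- stated objective: faster
-- what changed: B uses 2D coordinate compression: it computes the final brightness once per compressed region by replaying the instruction list, then expands regions to cells (the first touch of a cell writes its final value once), instead of A's read-modify-write of every rectangle cell for every instruction.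
import Mathlib
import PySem

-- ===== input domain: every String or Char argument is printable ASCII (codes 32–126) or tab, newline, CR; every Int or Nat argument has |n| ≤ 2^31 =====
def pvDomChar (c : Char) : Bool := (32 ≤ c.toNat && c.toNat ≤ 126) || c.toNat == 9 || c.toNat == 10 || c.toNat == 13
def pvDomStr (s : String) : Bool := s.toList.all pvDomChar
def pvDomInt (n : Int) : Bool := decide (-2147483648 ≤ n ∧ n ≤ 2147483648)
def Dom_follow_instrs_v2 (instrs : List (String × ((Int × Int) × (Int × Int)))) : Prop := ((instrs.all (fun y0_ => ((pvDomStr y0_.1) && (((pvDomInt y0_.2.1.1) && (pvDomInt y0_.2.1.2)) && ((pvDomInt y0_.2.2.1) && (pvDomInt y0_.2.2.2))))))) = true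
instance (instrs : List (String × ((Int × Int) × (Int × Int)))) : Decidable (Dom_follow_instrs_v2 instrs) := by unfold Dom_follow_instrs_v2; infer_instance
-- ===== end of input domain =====

-- B replaces A's incremental per-instruction read-modify-write of every rectangle cell by 2D
-- coordinate compression: the final brightness is computed once per compressed region by
-- replaying the instructions, then regions are expanded to cells (first touch writes the value).

-- ===== PORT A =====
-- the comprehension [(x, y) for x in range(minx, maxx + 1) for y in range(miny, maxy + 1)]
def pvCells (r : (Int × Int) × (Int × Int)) : List (Int × Int) :=
  (PySem.List.pyRange r.1.1 (r.2.1 + 1) 1).flatMap (fun x =>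
    (PySem.List.pyRange r.1.2 (r.2.2 + 1) 1).map (fun y => (x, y)))

-- A's loop body: one instruction applied to the Counter, cell by cell
def pvAStep (grid : PySem.Dict (Int × Int) Int) (instr : String × ((Int × Int) × (Int × Int))) :
    PySem.Dict (Int × Int) Int :=
  let new_cells := pvCells instr.2
  if instr.1 = "turn on" then
    new_cells.foldl (fun g cell => g.insert cell (g.getD cell 0 + 1)) grid
  else if instr.1 = "turn off" then
    new_cells.foldl (fun g cell => g.insert cell (max 0 (g.getD cell 0 - 1))) grid
  else if instr.1 = "toggle" then
    new_cells.foldl (fun g cell => g.insert cell (g.getD cell 0 + 2)) grid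
  else grid

def follow_instrs_v2 (instrs : List (String × ((Int × Int) × (Int × Int)))) : List (Int × Int × Int) :=
  ((instrs.foldl pvAStep PySem.Dict.empty).items).map (fun p => (p.1.1, p.1.2, p.2))

-- ===== PORT B =====
-- Source B: ops = [ins for ins in instrs if ins[0] in ("turn on", "turn off", "toggle")]
def pvOps (instrs : List (String × ((Int × Int) × (Int × Int)))) :
    List (String × ((Int × Int) × (Int × Int))) :=
  instrs.filter (fun i => i.1 == "turn on" || i.1 == "turn off" || i.1 == "toggle")

-- Source B: xs = sorted({v for _, ((ax, _), (bx, _)) in ops for v in (ax, bx + 1)})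
-- (the set is consumed only by sorted without key: order-independent)
def pvEdgesX (ops : List (String × ((Int × Int) × (Int × Int)))) : List Int :=
  PySem.List.sorted (PySem.Set.ofList (ops.flatMap (fun i => [i.2.1.1, i.2.2.1 + 1]))) (fun v => v) false

-- Source B: ys = sorted({v for _, ((_, ay), (_, by)) in ops for v in (ay, by + 1)})
def pvEdgesY (ops : List (String × ((Int × Int) × (Int × Int)))) : List Int :=
  PySem.List.sorted (PySem.Set.ofList (ops.flatMap (fun i => [i.2.1.2, i.2.2.2 + 1]))) (fun v => v) false

-- Source B: the replay loop computing one region's brightness (v = 0; for op, ... in ops: ...)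
def pvReplay (ops : List (String × ((Int × Int) × (Int × Int)))) (x y : Int) : Int :=
  ops.foldl (fun v i =>
    if i.2.1.1 ≤ x ∧ x ≤ i.2.2.1 ∧ i.2.1.2 ≤ y ∧ y ≤ i.2.2.2 then
      if i.1 = "turn on" then v + 1
      else if i.1 = "turn off" then max 0 (v - 1)
      else v + 2
    else v) 0

-- Source B: region = {}; for xi ...: for yi ...: region[(xi, yi)] = v
def pvRegion (ops : List (String × ((Int × Int) × (Int × Int)))) (xs ys : List Int) :
    PySem.Dict (Int × Int) Int :=
  (PySem.List.pyRange 0 (PySem.List.len xs - 1) 1).foldl (fun r xi =>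
    (PySem.List.pyRange 0 (PySem.List.len ys - 1) 1).foldl (fun r yi =>
      r.insert (xi, yi)
        (pvReplay ops (PySem.List.pyGetD xs xi 0) (PySem.List.pyGetD ys yi 0))) r)
    PySem.Dict.empty

-- Source B: xs.index(v)  (ValueError impossible here: v is an edge of some op, hence v ∈ xs)
def pvIdx (xs : List Int) (v : Int) : Int :=
  match PySem.List.index? xs v with
  | some k => (k : Int)
  | none => 0

-- Source B: the expansion loop body for one instruction (xs[xi] / region[(xi, yi)] are in range /
-- present by construction, so pyGetD / getD are exact)
def pvBInstrStep (xs ys : List Int) (region : PySem.Dict (Int × Int) Int)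
    (grid : PySem.Dict (Int × Int) Int) (i : String × ((Int × Int) × (Int × Int))) :
    PySem.Dict (Int × Int) Int :=
  let x0 := pvIdx xs i.2.1.1
  let x1 := pvIdx xs (i.2.2.1 + 1)
  let y0 := pvIdx ys i.2.1.2
  let y1 := pvIdx ys (i.2.2.2 + 1)
  (PySem.List.pyRange x0 x1 1).foldl (fun g xi =>
    (PySem.List.pyRange (PySem.List.pyGetD xs xi 0) (PySem.List.pyGetD xs (xi + 1) 0) 1).foldl (fun g x =>
      (PySem.List.pyRange y0 y1 1).foldl (fun g yi =>
        (PySem.List.pyRange (PySem.List.pyGetD ys yi 0) (PySem.List.pyGetD ys (yi + 1) 0) 1).foldl (fun g y =>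
          if g.contains (x, y) then g else g.insert (x, y) (region.getD (xi, yi) 0)) g) g) g) grid

def follow_instrs_v2_alt (instrs : List (String × ((Int × Int) × (Int × Int)))) : List (Int × Int × Int) :=
  let ops := pvOps instrs
  let xs := pvEdgesX ops
  let ys := pvEdgesY ops
  let region := pvRegion ops xs ys
  ((ops.foldl (pvBInstrStep xs ys region) PySem.Dict.empty).items).map (fun p => (p.1.1, p.1.2, p.2))

-- ===== PRECONDITION & SPEC =====
def Spec_follow_instrs_v2 (instrs : List (String × ((Int × Int) × (Int × Int)))) (out : List (Int × Int × Int)) : Prop := out = follow_instrs_v2_alt instrs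
instance (instrs : List (String × ((Int × Int) × (Int × Int)))) (out : List (Int × Int × Int)) : Decidable (Spec_follow_instrs_v2 instrs out) := by unfold Spec_follow_instrs_v2; infer_instance

-- ===== CLAIM (what is proved, stated in full; the proofs are below) =====
def Claim_equal_follow_instrs_v2 : Prop := ∀ (instrs : List (String × ((Int × Int) × (Int × Int)))), Dom_follow_instrs_v2 instrs → Spec_follow_instrs_v2 instrs (follow_instrs_v2 instrs)

-- ===== LEMMAS AND PROOFS =====

-- A's per-cell result: the brightness of one cell after replaying all instructions (A's op chain)
def pvFinalValue (instrs : List (String × ((Int × Int) × (Int × Int)))) (x y : Int) : Int :=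
  instrs.foldl (fun v instr =>
    if instr.2.1.1 ≤ x ∧ x ≤ instr.2.2.1 ∧ instr.2.1.2 ≤ y ∧ y ≤ instr.2.2.2 then
      if instr.1 = "turn on" then v + 1
      else if instr.1 = "turn off" then max 0 (v - 1)
      else if instr.1 = "toggle" then v + 2
      else v
    else v) 0

-- first-touch order of the cells: the key order in which both Counters are built
def pvTStep (acc : List (Int × Int)) (instr : String × ((Int × Int) × (Int × Int))) : List (Int × Int) :=
  if instr.1 = "turn on" ∨ instr.1 = "turn off" ∨ instr.1 = "toggle" then
    acc ++ (pvCells instr.2).filter (fun c => decide (c ∉ acc))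
  else acc

def pvTouched (P : List (String × ((Int × Int) × (Int × Int)))) : List (Int × Int) :=
  P.foldl pvTStep []

-- the same first-touch order, over the pre-filtered instruction list (B's shape)
def pvTF (acc : List (Int × Int)) (instr : String × ((Int × Int) × (Int × Int))) : List (Int × Int) :=
  acc ++ (pvCells instr.2).filter (fun c => decide (c ∉ acc))

def pvTouchedF (P : List (String × ((Int × Int) × (Int × Int)))) : List (Int × Int) :=
  P.foldl pvTF []

lemma mem_pvCells (r : (Int × Int) × (Int × Int)) (c : Int × Int) :
    c ∈ pvCells r ↔ (r.1.1 ≤ c.1 ∧ c.1 ≤ r.2.1 ∧ r.1.2 ≤ c.2 ∧ c.2 ≤ r.2.2) := by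
  obtain ⟨x, y⟩ := c
  simp [pvCells, List.mem_flatMap, PySem.List.mem_pyRange_one]
  omega

lemma nodup_pvCells (r : (Int × Int) × (Int × Int)) : (pvCells r).Nodup := by
  unfold pvCells
  rw [List.nodup_flatMap]
  constructor
  · intro x _
    exact (PySem.List.nodup_pyRange_one _ _).map (fun a b h => by simpa using h)
  · refine (PySem.List.nodup_pyRange_one _ _).imp ?_
    intro a b hne
    simp only [Function.onFun, List.disjoint_left, List.mem_map]
    rintro c ⟨y, _, rfl⟩ ⟨y', _, hc⟩
    exact hne (by simpa using (Prod.mk.injEq .. ▸ hc) |>.1.symm ▸ rfl)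

lemma nodup_foldl_tf : ∀ (P : List (String × ((Int × Int) × (Int × Int)))) (acc : List (Int × Int)),
    acc.Nodup → (P.foldl pvTF acc).Nodup := by
  intro P
  induction P with
  | nil => intro acc h; simpa using h
  | cons i P ih =>
    intro acc h
    refine ih _ ?_
    unfold pvTF
    rw [List.nodup_append]
    refine ⟨h, (nodup_pvCells _).filter _, ?_⟩
    intro a ha b hb
    rcases List.mem_filter.mp hb with ⟨-, hdec⟩
    simp only [decide_not, Bool.not_eq_eq_eq_not, Bool.not_true, decide_eq_false_iff_not] at hdec
    rintro rfl
    exact hdec ha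

lemma nodup_foldl_tstep : ∀ (P : List (String × ((Int × Int) × (Int × Int)))) (acc : List (Int × Int)),
    acc.Nodup → (P.foldl pvTStep acc).Nodup := by
  intro P
  induction P with
  | nil => intro acc h; simpa using h
  | cons i P ih =>
    intro acc h
    refine ih _ ?_
    unfold pvTStep
    split
    · rw [List.nodup_append]
      refine ⟨h, (nodup_pvCells _).filter _, ?_⟩
      intro a ha b hb
      rcases List.mem_filter.mp hb with ⟨-, hdec⟩
      simp only [decide_not, Bool.not_eq_eq_eq_not, Bool.not_true, decide_eq_false_iff_not] at hdec
      rintro rfl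
      exact hdec ha
    · exact h

lemma nodup_pvTouched (P : List (String × ((Int × Int) × (Int × Int)))) : (pvTouched P).Nodup :=
  nodup_foldl_tstep P [] List.nodup_nil

lemma nodup_pvTouchedF (P : List (String × ((Int × Int) × (Int × Int)))) : (pvTouchedF P).Nodup :=
  nodup_foldl_tf P [] List.nodup_nil

lemma mem_foldl_tstep_mono : ∀ (P : List (String × ((Int × Int) × (Int × Int)))) (acc : List (Int × Int))
    (c : Int × Int), c ∈ acc → c ∈ P.foldl pvTStep acc := by
  intro P
  induction P with
  | nil => intro acc c h; simpa using h
  | cons i P ih =>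
    intro acc c h
    refine ih _ _ ?_
    unfold pvTStep
    split
    · exact List.mem_append_left _ h
    · exact h

lemma mem_foldl_tstep_of : ∀ (P : List (String × ((Int × Int) × (Int × Int)))) (acc : List (Int × Int))
    (i : String × ((Int × Int) × (Int × Int))) (c : Int × Int), i ∈ P →
    (i.1 = "turn on" ∨ i.1 = "turn off" ∨ i.1 = "toggle") → c ∈ pvCells i.2 →
    c ∈ P.foldl pvTStep acc := by
  intro P
  induction P with
  | nil => intro _ _ _ h; simp at h
  | cons j P ih =>
    intro acc i c hmem hop hc
    rcases List.mem_cons.mp hmem with rfl | hmem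
    · simp only [List.foldl_cons]
      refine mem_foldl_tstep_mono _ _ _ ?_
      unfold pvTStep
      rw [if_pos hop]
      by_cases hacc : c ∈ acc
      · exact List.mem_append_left _ hacc
      · exact List.mem_append_right _ (List.mem_filter.mpr ⟨hc, by simpa using hacc⟩)
    · exact ih _ _ _ hmem hop hc

lemma foldl_val_id : ∀ (P : List (String × ((Int × Int) × (Int × Int)))) (x y v : Int),
    (∀ i ∈ P, ¬((i.1 = "turn on" ∨ i.1 = "turn off" ∨ i.1 = "toggle") ∧
      (i.2.1.1 ≤ x ∧ x ≤ i.2.2.1 ∧ i.2.1.2 ≤ y ∧ y ≤ i.2.2.2))) →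
    (P.foldl (fun v instr =>
      if instr.2.1.1 ≤ x ∧ x ≤ instr.2.2.1 ∧ instr.2.1.2 ≤ y ∧ y ≤ instr.2.2.2 then
        if instr.1 = "turn on" then v + 1
        else if instr.1 = "turn off" then max 0 (v - 1)
        else if instr.1 = "toggle" then v + 2
        else v
      else v) v) = v := by
  intro P
  induction P with
  | nil => intro x y v _; rfl
  | cons i P ih =>
    intro x y v h
    have hi := h i (List.mem_cons_self ..)
    simp only [List.foldl_cons]
    have hstep : (if i.2.1.1 ≤ x ∧ x ≤ i.2.2.1 ∧ i.2.1.2 ≤ y ∧ y ≤ i.2.2.2 then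
        if i.1 = "turn on" then v + 1
        else if i.1 = "turn off" then max 0 (v - 1)
        else if i.1 = "toggle" then v + 2
        else v
      else v) = v := by
      by_cases hb : i.2.1.1 ≤ x ∧ x ≤ i.2.2.1 ∧ i.2.1.2 ≤ y ∧ y ≤ i.2.2.2
      · rw [if_pos hb]
        have : ¬(i.1 = "turn on" ∨ i.1 = "turn off" ∨ i.1 = "toggle") := fun hop => hi ⟨hop, hb⟩
        push Not at this
        simp [this.1, this.2.1, this.2.2]
      · rw [if_neg hb]
    rw [hstep]
    exact ih x y v (fun j hj => h j (List.mem_cons_of_mem _ hj))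

lemma pvVal_zero (P : List (String × ((Int × Int) × (Int × Int)))) (c : Int × Int)
    (h : c ∉ pvTouched P) : pvFinalValue P c.1 c.2 = 0 := by
  unfold pvFinalValue
  refine foldl_val_id P c.1 c.2 0 ?_
  intro i hi ⟨hop, hb⟩
  exact h (mem_foldl_tstep_of P [] i c hi hop ((mem_pvCells i.2 c).mpr hb))

lemma pvFinalValue_append (P : List (String × ((Int × Int) × (Int × Int))))
    (i : String × ((Int × Int) × (Int × Int))) (x y : Int) :
    pvFinalValue (P ++ [i]) x y =
      (if i.2.1.1 ≤ x ∧ x ≤ i.2.2.1 ∧ i.2.1.2 ≤ y ∧ y ≤ i.2.2.2 then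
        if i.1 = "turn on" then pvFinalValue P x y + 1
        else if i.1 = "turn off" then max 0 (pvFinalValue P x y - 1)
        else if i.1 = "toggle" then pvFinalValue P x y + 2
        else pvFinalValue P x y
      else pvFinalValue P x y) := by
  simp [pvFinalValue, List.foldl_append]

-- A's inner loop over the distinct cells of one rectangle, on a dict of known shape
lemma items_foldl_insertF (f : Int → Int) :
    ∀ (cs : List (Int × Int)) (d : PySem.Dict (Int × Int) Int) (L : List (Int × Int))
      (g : (Int × Int) → Int), cs.Nodup → L.Nodup →
      d.items = L.map (fun c => (c, g c)) → (∀ c, c ∉ L → g c = 0) →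
      (cs.foldl (fun g cell => g.insert cell (f (g.getD cell 0))) d).items =
        (L ++ cs.filter (fun c => decide (c ∉ L))).map
          (fun c => (c, if c ∈ cs then f (g c) else g c)) := by
  intro cs
  induction cs with
  | nil =>
    intro d L g _ hL hitems hg
    simp [hitems]
  | cons c cs ih =>
    intro d L g hnd hL hitems hg
    obtain ⟨hccs, hnd'⟩ := List.nodup_cons.mp hnd
    have hkeys : d.keys = L := by
      simp [PySem.Dict.keys, hitems, List.map_map, Function.comp_def]
    have hnk : d.keys.Nodup := hkeys ▸ hL
    have hgetD : d.getD c 0 = g c := by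
      by_cases hc : c ∈ L
      · exact PySem.Dict.getD_of_mem_items d (by rw [hitems]; exact List.mem_map_of_mem hc) hnk 0
      · have hcont : d.contains c = false := by
          rw [PySem.Dict.contains_eq_decide_mem_keys, hkeys]; simpa using hc
        rw [PySem.Dict.getD_of_not_contains d 0 hcont, hg c hc]
    have hfun : ∀ g1 : (Int × Int) → Int, (g1 = fun c' => if c' = c then f (g c) else g c') →
        (fun c' => ((c' : Int × Int), if c' ∈ cs then f (g1 c') else g1 c')) =
        (fun c' => (c', if c' ∈ c :: cs then f (g c') else g c')) := by
      rintro g1 rfl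
      funext c'
      by_cases hc'c : c' = c
      · subst hc'c; simp [hccs]
      · by_cases hmem : c' ∈ cs <;> simp [hc'c, hmem, List.mem_cons]
    simp only [List.foldl_cons, hgetD]
    by_cases hc : c ∈ L
    · have hcont : d.contains c = true := by
        rw [PySem.Dict.contains_eq_decide_mem_keys, hkeys]; simpa using hc
      have hitems' : (d.insert c (f (g c))).items =
          L.map (fun c' => (c', if c' = c then f (g c) else g c')) := by
        rw [PySem.Dict.items_insert_of_contains d _ hcont, hitems, List.map_map]
        refine List.map_congr_left ?_
        intro a _
        by_cases hac : a = c <;> simp [hac]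
      rw [ih _ L _ hnd' hL hitems' (fun c' hc' => by
        have hne : c' ≠ c := fun h => hc' (h ▸ hc)
        simp [hne, hg c' hc'])]
      rw [hfun _ rfl]
      have hfl : (c :: cs).filter (fun c' => decide (c' ∉ L)) =
          cs.filter (fun c' => decide (c' ∉ L)) := by
        simp [hc]
      rw [hfl]
    · have hcont : d.contains c = false := by
        rw [PySem.Dict.contains_eq_decide_mem_keys, hkeys]; simpa using hc
      have hitems' : (d.insert c (f (g c))).items =
          (L ++ [c]).map (fun c' => (c', if c' = c then f (g c) else g c')) := by
        rw [PySem.Dict.items_insert_of_not_contains d _ hcont, hitems, List.map_append]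
        congr 1
        · refine List.map_congr_left ?_
          intro a ha
          have : a ≠ c := fun h => hc (h ▸ ha)
          simp [this]
        · simp
      have hL' : (L ++ [c]).Nodup := by
        rw [List.nodup_append]
        exact ⟨hL, List.nodup_singleton c, by intro a ha b hb; simp at hb; subst hb; exact fun h => hc (h ▸ ha)⟩
      rw [ih _ (L ++ [c]) _ hnd' hL' hitems' (fun c' hc' => by
        simp only [List.mem_append, List.mem_singleton, not_or] at hc'
        simp [hc'.2, hg c' hc'.1])]
      rw [hfun _ rfl]
      have hfilt : cs.filter (fun c' => decide (c' ∉ L ++ [c])) =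
          cs.filter (fun c' => decide (c' ∉ L)) := by
        refine List.filter_congr ?_
        intro a ha
        have : a ≠ c := fun h => hccs (h ▸ ha)
        simp [this]
      have hfl : (c :: cs).filter (fun c' => decide (c' ∉ L)) =
          c :: cs.filter (fun c' => decide (c' ∉ L)) := by
        simp [hc]
      rw [hfilt, hfl]
      simp [List.append_assoc]

-- B's inner loop: insert-if-absent over the distinct cells of one rectangle
lemma items_foldl_skipInsert (h : (Int × Int) → Int) :
    ∀ (cs : List (Int × Int)) (d : PySem.Dict (Int × Int) Int) (L : List (Int × Int)),
      cs.Nodup → L.Nodup → d.items = L.map (fun c => (c, h c)) →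
      (cs.foldl (fun g cell => if g.contains cell then g else g.insert cell (h cell)) d).items =
        (L ++ cs.filter (fun c => decide (c ∉ L))).map (fun c => (c, h c)) := by
  intro cs
  induction cs with
  | nil => intro d L _ hL hitems; simp [hitems]
  | cons c cs ih =>
    intro d L hnd hL hitems
    obtain ⟨hccs, hnd'⟩ := List.nodup_cons.mp hnd
    have hkeys : d.keys = L := by
      simp [PySem.Dict.keys, hitems, List.map_map, Function.comp_def]
    simp only [List.foldl_cons]
    by_cases hc : c ∈ L
    · have hcont : d.contains c = true := by
        rw [PySem.Dict.contains_eq_decide_mem_keys, hkeys]; simpa using hc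
      rw [hcont]
      simp only [if_true]
      rw [ih d L hnd' hL hitems]
      have hfl : (c :: cs).filter (fun c' => decide (c' ∉ L)) =
          cs.filter (fun c' => decide (c' ∉ L)) := by
        simp [hc]
      rw [hfl]
    · have hcont : d.contains c = false := by
        rw [PySem.Dict.contains_eq_decide_mem_keys, hkeys]; simpa using hc
      rw [hcont]
      simp only [Bool.false_eq_true, if_false]
      have hitems' : (d.insert c (h c)).items = (L ++ [c]).map (fun c' => (c', h c')) := by
        rw [PySem.Dict.items_insert_of_not_contains d _ hcont, hitems, List.map_append]; simp
      have hL' : (L ++ [c]).Nodup := by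
        rw [List.nodup_append]
        exact ⟨hL, List.nodup_singleton c, by intro a ha b hb; simp at hb; subst hb; exact fun he => hc (he ▸ ha)⟩
      rw [ih _ (L ++ [c]) hnd' hL' hitems']
      have hfilt : cs.filter (fun c' => decide (c' ∉ L ++ [c])) =
          cs.filter (fun c' => decide (c' ∉ L)) := by
        refine List.filter_congr ?_
        intro a ha
        have : a ≠ c := fun he => hccs (he ▸ ha)
        simp [this]
      have hfl : (c :: cs).filter (fun c' => decide (c' ∉ L)) =
          c :: cs.filter (fun c' => decide (c' ∉ L)) := by
        simp [hc]
      rw [hfilt, hfl]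
      simp [List.append_assoc]

lemma touched_append (P : List (String × ((Int × Int) × (Int × Int))))
    (i : String × ((Int × Int) × (Int × Int))) :
    pvTouched (P ++ [i]) = pvTStep (pvTouched P) i := by
  simp [pvTouched, List.foldl_append]

lemma touchedF_append (P : List (String × ((Int × Int) × (Int × Int))))
    (i : String × ((Int × Int) × (Int × Int))) :
    pvTouchedF (P ++ [i]) = pvTF (pvTouchedF P) i := by
  simp [pvTouchedF, List.foldl_append]

lemma A_items (P : List (String × ((Int × Int) × (Int × Int)))) :
    (P.foldl pvAStep PySem.Dict.empty).items =
      (pvTouched P).map (fun c => (c, pvFinalValue P c.1 c.2)) := by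
  induction P using List.reverseRecOn with
  | nil => rfl
  | append_singleton P i ih =>
    rw [List.foldl_append, List.foldl_cons, List.foldl_nil, touched_append]
    have hval : ∀ (f : Int → Int), (∀ v, (if i.1 = "turn on" then v + 1
          else if i.1 = "turn off" then max 0 (v - 1)
          else if i.1 = "toggle" then v + 2 else v) = f v) →
        (fun c => ((c : Int × Int), if c ∈ pvCells i.2 then f (pvFinalValue P c.1 c.2)
            else pvFinalValue P c.1 c.2)) =
        (fun c => (c, pvFinalValue (P ++ [i]) c.1 c.2)) := by
      intro f hf
      funext c
      rw [pvFinalValue_append]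
      by_cases hb : i.2.1.1 ≤ c.1 ∧ c.1 ≤ i.2.2.1 ∧ i.2.1.2 ≤ c.2 ∧ c.2 ≤ i.2.2.2
      · rw [if_pos ((mem_pvCells i.2 c).mpr hb), if_pos hb, hf]
      · rw [if_neg (fun hm => hb ((mem_pvCells i.2 c).mp hm)), if_neg hb]
    by_cases h1 : i.1 = "turn on"
    · rw [show pvAStep (P.foldl pvAStep PySem.Dict.empty) i =
            (pvCells i.2).foldl (fun g cell => g.insert cell (g.getD cell 0 + 1))
              (P.foldl pvAStep PySem.Dict.empty) from by simp [pvAStep, h1]]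
      rw [show pvTStep (pvTouched P) i =
            pvTouched P ++ (pvCells i.2).filter (fun c => decide (c ∉ pvTouched P)) from by
          simp [pvTStep, h1]]
      rw [items_foldl_insertF (fun v => v + 1) _ _ _ _ (nodup_pvCells _) (nodup_pvTouched P) ih
        (fun c hc => pvVal_zero P c hc)]
      rw [hval (fun v => v + 1) (fun v => by simp [h1])]
    · by_cases h2 : i.1 = "turn off"
      · rw [show pvAStep (P.foldl pvAStep PySem.Dict.empty) i =
              (pvCells i.2).foldl (fun g cell => g.insert cell (max 0 (g.getD cell 0 - 1)))
                (P.foldl pvAStep PySem.Dict.empty) from by simp [pvAStep, h2]]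
        rw [show pvTStep (pvTouched P) i =
              pvTouched P ++ (pvCells i.2).filter (fun c => decide (c ∉ pvTouched P)) from by
            simp [pvTStep, h2]]
        rw [items_foldl_insertF (fun v => max 0 (v - 1)) _ _ _ _ (nodup_pvCells _)
          (nodup_pvTouched P) ih (fun c hc => pvVal_zero P c hc)]
        rw [hval (fun v => max 0 (v - 1)) (fun v => by simp [h2])]
      · by_cases h3 : i.1 = "toggle"
        · rw [show pvAStep (P.foldl pvAStep PySem.Dict.empty) i =
                (pvCells i.2).foldl (fun g cell => g.insert cell (g.getD cell 0 + 2))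
                  (P.foldl pvAStep PySem.Dict.empty) from by simp [pvAStep, h3]]
          rw [show pvTStep (pvTouched P) i =
                pvTouched P ++ (pvCells i.2).filter (fun c => decide (c ∉ pvTouched P)) from by
              simp [pvTStep, h3]]
          rw [items_foldl_insertF (fun v => v + 2) _ _ _ _ (nodup_pvCells _)
            (nodup_pvTouched P) ih (fun c hc => pvVal_zero P c hc)]
          rw [hval (fun v => v + 2) (fun v => by simp [h3])]
        · rw [show pvAStep (P.foldl pvAStep PySem.Dict.empty) i =
                P.foldl pvAStep PySem.Dict.empty from by simp [pvAStep, h1, h2, h3]]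
          rw [show pvTStep (pvTouched P) i = pvTouched P from by simp [pvTStep, h1, h2, h3]]
          rw [ih]
          refine List.map_congr_left ?_
          intro c _
          rw [pvFinalValue_append]
          by_cases hb : i.2.1.1 ≤ c.1 ∧ c.1 ≤ i.2.2.1 ∧ i.2.1.2 ≤ c.2 ∧ c.2 ≤ i.2.2.2
          · rw [if_pos hb]; simp [h1, h2, h3]
          · rw [if_neg hb]

-- ===== B-side lemmas =====

-- the first-touch order over instrs equals the one over the filtered ops
lemma touched_eq_touchedF (instrs : List (String × ((Int × Int) × (Int × Int)))) :
    pvTouched instrs = pvTouchedF (pvOps instrs) := by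
  unfold pvTouched pvTouchedF pvOps
  have hstep : pvTStep = fun acc (i : String × ((Int × Int) × (Int × Int))) =>
      if i.1 = "turn on" ∨ i.1 = "turn off" ∨ i.1 = "toggle" then pvTF acc i else acc := by
    funext acc i
    unfold pvTStep pvTF
    rfl
  rw [hstep, PySem.List.foldl_ite_eq_foldl_filter]
  congr 1
  refine List.filter_congr ?_
  intro i _
  by_cases h1 : i.1 = "turn on" <;> by_cases h2 : i.1 = "turn off" <;>
    by_cases h3 : i.1 = "toggle" <;> simp [h1, h2, h3]

-- B's outer loop with per-cell final values (the shape bstep_eq produces) builds the same items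
lemma B_items (h : (Int × Int) → Int) :
    ∀ (P : List (String × ((Int × Int) × (Int × Int)))),
      (P.foldl (fun g i => (pvCells i.2).foldl
          (fun g cell => if g.contains cell then g else g.insert cell (h cell)) g)
        PySem.Dict.empty).items =
        (pvTouchedF P).map (fun c => (c, h c)) := by
  intro P
  induction P using List.reverseRecOn with
  | nil => rfl
  | append_singleton P i ih =>
    rw [List.foldl_append, List.foldl_cons, List.foldl_nil, touchedF_append]
    exact items_foldl_skipInsert h _ _ _ (nodup_pvCells _) (nodup_pvTouchedF P) ih

-- strictly sorted lists: monotone indexing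
lemma sorted_mono_le (xs : List Int) (hxs : xs.Pairwise (· < ·)) {i j : Nat} (hij : i ≤ j)
    (hj : j < xs.length) : xs[i]'(lt_of_le_of_lt hij hj) ≤ xs[j] := by
  rcases Nat.lt_or_ge i j with h | h
  · exact le_of_lt ((List.pairwise_iff_getElem.mp hxs) i j _ hj h)
  · have : i = j := le_antisymm hij h
    subst this; exact le_refl _

-- a coordinate stripe: membership in any rectangle edge interval agrees with the stripe's left edge
lemma sorted_le_reflect (xs : List Int) (hxs : xs.Pairwise (· < ·)) {i j : Nat}
    (hi : i < xs.length) (hj : j < xs.length) (h : xs[i] ≤ xs[j]) : i ≤ j := by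
  by_contra hc
  push Not at hc
  exact absurd ((List.pairwise_iff_getElem.mp hxs) j i hj hi hc) (by omega)

lemma stripe_le_left (xs : List Int) (hxs : xs.Pairwise (· < ·)) {n : Nat} (hn1 : n + 1 < xs.length)
    {x a : Int} (ha : a ∈ xs) (hx1 : xs[n]'(by omega) ≤ x) (hx2 : x < xs[n + 1]) :
    (a ≤ x ↔ a ≤ xs[n]'(by omega)) := by
  constructor
  · intro hax
    obtain ⟨j, hj, hja⟩ := List.mem_iff_getElem.mp ha
    subst hja
    by_contra hlt
    push Not at hlt
    have hnj : n + 1 ≤ j := by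
      by_contra hjn
      push Not at hjn
      exact absurd (sorted_mono_le xs hxs (Nat.lt_succ_iff.mp hjn) (by omega)) (not_le.mpr hlt)
    have := sorted_mono_le xs hxs hnj hj
    omega
  · intro h
    exact le_trans h hx1

lemma stripe_le_right (xs : List Int) (hxs : xs.Pairwise (· < ·)) {n : Nat} (hn1 : n + 1 < xs.length)
    {x b : Int} (hb : b + 1 ∈ xs) (hx1 : xs[n]'(by omega) ≤ x) (hx2 : x < xs[n + 1]) :
    (x ≤ b ↔ xs[n]'(by omega) ≤ b) := by
  constructor
  · intro h
    exact le_trans hx1 h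
  · intro h
    by_contra hbx
    push Not at hbx
    obtain ⟨j, hj, hjb⟩ := List.mem_iff_getElem.mp hb
    have h2 : xs[j] < xs[n + 1] := by omega
    have hjn : j ≤ n := by
      by_contra hc
      push Not at hc
      have := sorted_mono_le xs hxs (show n + 1 ≤ j by omega) hj
      omega
    have := sorted_mono_le xs hxs hjn (by omega)
    omega

-- replaying at a stripe representative gives every cell of the region the same value
lemma replay_congr (ops : List (String × ((Int × Int) × (Int × Int)))) (xs ys : List Int)
    (hxs : xs.Pairwise (· < ·)) (hys : ys.Pairwise (· < ·))
    (hmx : ∀ i ∈ ops, i.2.1.1 ∈ xs ∧ i.2.2.1 + 1 ∈ xs)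
    (hmy : ∀ i ∈ ops, i.2.1.2 ∈ ys ∧ i.2.2.2 + 1 ∈ ys)
    {n m : Nat} (hn1 : n + 1 < xs.length) (hm1 : m + 1 < ys.length)
    {x y : Int} (hx1 : xs[n]'(by omega) ≤ x) (hx2 : x < xs[n + 1])
    (hy1 : ys[m]'(by omega) ≤ y) (hy2 : y < ys[m + 1]) :
    pvReplay ops (xs[n]'(by omega)) (ys[m]'(by omega)) = pvReplay ops x y := by
  unfold pvReplay
  refine PySem.List.foldl_congr_mem' ops _ _ 0 ?_
  intro i hi v
  have hax := stripe_le_left xs hxs hn1 (hmx i hi).1 hx1 hx2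
  have hbx := stripe_le_right xs hxs hn1 (hmx i hi).2 hx1 hx2
  have hay := stripe_le_left ys hys hm1 (hmy i hi).1 hy1 hy2
  have hby := stripe_le_right ys hys hm1 (hmy i hi).2 hy1 hy2
  refine if_congr ?_ rfl rfl
  constructor
  · rintro ⟨h1, h2, h3, h4⟩
    exact ⟨hax.mpr h1, hbx.mpr h2, hay.mpr h3, hby.mpr h4⟩
  · rintro ⟨h1, h2, h3, h4⟩
    exact ⟨hax.mp h1, hbx.mp h2, hay.mp h3, hby.mp h4⟩

-- B's replay over ops computes A's per-cell final value
lemma replay_aux (x y : Int) : ∀ (P : List (String × ((Int × Int) × (Int × Int)))) (v : Int),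
    ((P.filter (fun i => i.1 == "turn on" || i.1 == "turn off" || i.1 == "toggle")).foldl
      (fun v i =>
        if i.2.1.1 ≤ x ∧ x ≤ i.2.2.1 ∧ i.2.1.2 ≤ y ∧ y ≤ i.2.2.2 then
          if i.1 = "turn on" then v + 1
          else if i.1 = "turn off" then max 0 (v - 1)
          else v + 2
        else v) v) =
    P.foldl (fun v instr =>
      if instr.2.1.1 ≤ x ∧ x ≤ instr.2.2.1 ∧ instr.2.1.2 ≤ y ∧ y ≤ instr.2.2.2 then
        if instr.1 = "turn on" then v + 1
        else if instr.1 = "turn off" then max 0 (v - 1)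
        else if instr.1 = "toggle" then v + 2
        else v
      else v) v := by
  intro P
  induction P with
  | nil => intro v; rfl
  | cons i P ih =>
    intro v
    by_cases hp : (i.1 == "turn on" || i.1 == "turn off" || i.1 == "toggle") = true
    · rw [List.filter_cons, if_pos hp, List.foldl_cons, List.foldl_cons]
      have hop : i.1 = "turn on" ∨ i.1 = "turn off" ∨ i.1 = "toggle" := by
        have h := hp
        simp only [Bool.or_eq_true, beq_iff_eq] at h
        tauto
      have hstep : (if i.2.1.1 ≤ x ∧ x ≤ i.2.2.1 ∧ i.2.1.2 ≤ y ∧ y ≤ i.2.2.2 then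
          if i.1 = "turn on" then v + 1
          else if i.1 = "turn off" then max 0 (v - 1)
          else v + 2
        else v) = (if i.2.1.1 ≤ x ∧ x ≤ i.2.2.1 ∧ i.2.1.2 ≤ y ∧ y ≤ i.2.2.2 then
          if i.1 = "turn on" then v + 1
          else if i.1 = "turn off" then max 0 (v - 1)
          else if i.1 = "toggle" then v + 2
          else v
        else v) := by
        rcases hop with h | h | h <;> simp [h]
      rw [hstep, ih]
    · obtain ⟨⟨h1, h2⟩, h3⟩ : (¬i.1 = "turn on" ∧ ¬i.1 = "turn off") ∧ ¬i.1 = "toggle" := by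
        simpa using hp
      rw [List.filter_cons, if_neg hp, List.foldl_cons]
      have hstep : (if i.2.1.1 ≤ x ∧ x ≤ i.2.2.1 ∧ i.2.1.2 ≤ y ∧ y ≤ i.2.2.2 then
          if i.1 = "turn on" then v + 1
          else if i.1 = "turn off" then max 0 (v - 1)
          else if i.1 = "toggle" then v + 2
          else v
        else v) = v := by
        by_cases hb : i.2.1.1 ≤ x ∧ x ≤ i.2.2.1 ∧ i.2.1.2 ≤ y ∧ y ≤ i.2.2.2 <;>
          simp [hb, h1, h2, h3]
      rw [hstep, ih]

lemma replay_eq_finalValue (instrs : List (String × ((Int × Int) × (Int × Int)))) (x y : Int) :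
    pvReplay (pvOps instrs) x y = pvFinalValue instrs x y := by
  unfold pvReplay pvFinalValue pvOps
  exact replay_aux x y instrs 0

-- consecutive stripes of a sorted list concatenate to one range
lemma flat_stripes (xs : List Int) (hxs : xs.Pairwise (· < ·)) :
    ∀ (m : Nat), ∀ (k : Nat), (hkm : k ≤ m) → (hm : m < xs.length) →
    (PySem.List.pyRange (k : Int) (m : Int) 1).flatMap (fun xi =>
        PySem.List.pyRange (PySem.List.pyGetD xs xi 0) (PySem.List.pyGetD xs (xi + 1) 0) 1) =
      PySem.List.pyRange (xs[k]'(by omega)) (xs[m]'(by omega)) 1 := by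
  intro m
  induction m with
  | zero =>
    intro k hkm hm
    have hk0 : k = 0 := by omega
    subst hk0
    rw [PySem.List.pyRange_one_eq_nil (le_refl _), PySem.List.pyRange_one_eq_nil (le_refl _)]
    rfl
  | succ m ih =>
    intro k hkm hm
    by_cases hk : k = m + 1
    · subst hk
      rw [PySem.List.pyRange_one_eq_nil (le_refl _), PySem.List.pyRange_one_eq_nil (le_refl _)]
      rfl
    · have hkm' : k ≤ m := by omega
      have hm' : m < xs.length := by omega
      have hcast : ((m + 1 : Nat) : Int) = (m : Int) + 1 := by push_cast; ring
      rw [hcast, PySem.List.pyRange_one_succ_right (by exact_mod_cast hkm'),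
        List.flatMap_append, ih k hkm' hm']
      have hgd1 : PySem.List.pyGetD xs (m : Int) 0 = xs[m] := by
        rw [PySem.List.pyGetD_natCast]
        exact List.getD_eq_getElem xs 0 hm'
      have hgd2 : PySem.List.pyGetD xs ((m : Int) + 1) 0 = xs[m + 1] := by
        rw [show ((m : Int) + 1) = ((m + 1 : Nat) : Int) by push_cast; ring,
          PySem.List.pyGetD_natCast]
        exact List.getD_eq_getElem xs 0 hm
      simp only [List.flatMap_cons, List.flatMap_nil, List.append_nil, hgd1, hgd2]
      rw [← PySem.List.pyRange_one_append (xs[k]'(by omega)) (xs[m]'(by omega)) (xs[m + 1])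
        (sorted_mono_le xs hxs hkm' hm') (sorted_mono_le xs hxs (Nat.le_succ m) hm)]

-- lookup in a dict built by inserting key-determined values
lemma getD_foldl_insert_keyfun (F : (Int × Int) → Int) :
    ∀ (L : List (Int × Int)) (d : PySem.Dict (Int × Int) Int) (k : (Int × Int)),
      (L.foldl (fun r c => r.insert c (F c)) d).getD k 0 =
        if k ∈ L then F k else d.getD k 0 := by
  intro L
  induction L using List.reverseRecOn with
  | nil => intro d k; simp
  | append_singleton L a ih =>
    intro d k
    rw [List.foldl_append, List.foldl_cons, List.foldl_nil, PySem.Dict.getD_insert, ih]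
    by_cases hk : k = a
    · simp [hk]
    · simp [hk, List.mem_append]

-- the region dict holds the replay value of its representative corner
lemma region_getD (ops : List (String × ((Int × Int) × (Int × Int)))) (xs ys : List Int)
    (xi yi : Int) (hx0 : 0 ≤ xi) (hx1 : xi < PySem.List.len xs - 1)
    (hy0 : 0 ≤ yi) (hy1 : yi < PySem.List.len ys - 1) :
    (pvRegion ops xs ys).getD (xi, yi) 0 =
      pvReplay ops (PySem.List.pyGetD xs xi 0) (PySem.List.pyGetD ys yi 0) := by
  unfold pvRegion
  have hflat : (((PySem.List.pyRange 0 (PySem.List.len xs - 1) 1).flatMap (fun a =>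
        (PySem.List.pyRange 0 (PySem.List.len ys - 1) 1).map (fun b => ((a : Int), (b : Int))))).foldl
        (fun r c => r.insert c (pvReplay ops (PySem.List.pyGetD xs c.1 0) (PySem.List.pyGetD ys c.2 0)))
        PySem.Dict.empty) =
      ((PySem.List.pyRange 0 (PySem.List.len xs - 1) 1).foldl (fun r xi =>
        (PySem.List.pyRange 0 (PySem.List.len ys - 1) 1).foldl (fun r yi =>
          r.insert (xi, yi)
            (pvReplay ops (PySem.List.pyGetD xs xi 0) (PySem.List.pyGetD ys yi 0))) r)
        PySem.Dict.empty) := by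
    simp only [List.foldl_flatMap, List.foldl_map]
  rw [← hflat, getD_foldl_insert_keyfun]
  rw [if_pos ?_]
  · rw [List.mem_flatMap]
    refine ⟨xi, ?_, ?_⟩
    · exact PySem.List.mem_pyRange_one.mpr ⟨hx0, hx1⟩
    · exact List.mem_map.mpr ⟨yi, PySem.List.mem_pyRange_one.mpr ⟨hy0, hy1⟩, rfl⟩

-- index of a present value in a strictly sorted list
lemma pvIdx_spec (xs : List Int) {v : Int} (hv : v ∈ xs) :
    ∃ k : Nat, pvIdx xs v = (k : Int) ∧ ∃ hk : k < xs.length, xs[k] = v := by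
  cases h : PySem.List.index? xs v with
  | none => exact absurd ((PySem.List.index?_eq_none_iff xs v).mp h) (not_not.mpr hv)
  | some k =>
    obtain ⟨hk, hval, -⟩ := PySem.List.getElem_of_index?_eq_some h
    exact ⟨k, by unfold pvIdx; rw [h], hk, hval⟩

-- the expansion loop for one instruction is the insert-if-absent fold over its cells
lemma bstep_eq (instrs : List (String × ((Int × Int) × (Int × Int)))) (xs ys : List Int)
    (region : PySem.Dict (Int × Int) Int)
    (hxs : xs.Pairwise (· < ·)) (hys : ys.Pairwise (· < ·))
    (hmx : ∀ i ∈ pvOps instrs, i.2.1.1 ∈ xs ∧ i.2.2.1 + 1 ∈ xs)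
    (hmy : ∀ i ∈ pvOps instrs, i.2.1.2 ∈ ys ∧ i.2.2.2 + 1 ∈ ys)
    (hreg : ∀ (xi yi : Int), 0 ≤ xi → xi < PySem.List.len xs - 1 →
      0 ≤ yi → yi < PySem.List.len ys - 1 →
      region.getD (xi, yi) 0 =
        pvReplay (pvOps instrs) (PySem.List.pyGetD xs xi 0) (PySem.List.pyGetD ys yi 0))
    (i : String × ((Int × Int) × (Int × Int))) (hi : i ∈ pvOps instrs)
    (g : PySem.Dict (Int × Int) Int) :
    pvBInstrStep xs ys region g i =
      (pvCells i.2).foldl (fun g cell =>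
        if g.contains cell then g
        else g.insert cell (pvFinalValue instrs cell.1 cell.2)) g := by
  obtain ⟨kx0, ex0, hkx0, vx0⟩ := pvIdx_spec xs (hmx i hi).1
  obtain ⟨kx1, ex1, hkx1, vx1⟩ := pvIdx_spec xs (hmx i hi).2
  obtain ⟨ky0, ey0, hky0, vy0⟩ := pvIdx_spec ys (hmy i hi).1
  obtain ⟨ky1, ey1, hky1, vy1⟩ := pvIdx_spec ys (hmy i hi).2
  unfold pvBInstrStep
  simp only [ex0, ex1, ey0, ey1]
  by_cases hxe : i.2.1.1 ≤ i.2.2.1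
  · by_cases hye : i.2.1.2 ≤ i.2.2.2
    · -- both ranges nonempty: the generic coordinate-compression argument
      have hkx : kx0 < kx1 := by
        by_contra hc
        push Not at hc
        have := sorted_mono_le xs hxs hc hkx0
        omega
      have hky : ky0 < ky1 := by
        by_contra hc
        push Not at hc
        have := sorted_mono_le ys hys hc hky0
        omega
      have hcell : ∀ (xi yi x y : Int), (kx0 : Int) ≤ xi → xi < (kx1 : Int) →
          (ky0 : Int) ≤ yi → yi < (ky1 : Int) →
          PySem.List.pyGetD xs xi 0 ≤ x → x < PySem.List.pyGetD xs (xi + 1) 0 →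
          PySem.List.pyGetD ys yi 0 ≤ y → y < PySem.List.pyGetD ys (yi + 1) 0 →
          region.getD (xi, yi) 0 = pvFinalValue instrs x y := by
        intro xi yi x y h1 h2 h3 h4 h5 h6 h7 h8
        have hn1 : xi.toNat + 1 < xs.length := by omega
        have hm1 : yi.toNat + 1 < ys.length := by omega
        have hgx0 : PySem.List.pyGetD xs xi 0 = xs[xi.toNat]'(by omega) :=
          PySem.List.pyGetD_eq_getElem xs 0 (by omega) (by omega)
        have hgx1 : PySem.List.pyGetD xs (xi + 1) 0 = xs[xi.toNat + 1] := by
          rw [PySem.List.pyGetD_eq_getElem xs 0 (by omega) (by omega)]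
          have ht : (xi + 1).toNat = xi.toNat + 1 := by omega
          simp only [ht]
        have hgy0 : PySem.List.pyGetD ys yi 0 = ys[yi.toNat]'(by omega) :=
          PySem.List.pyGetD_eq_getElem ys 0 (by omega) (by omega)
        have hgy1 : PySem.List.pyGetD ys (yi + 1) 0 = ys[yi.toNat + 1] := by
          rw [PySem.List.pyGetD_eq_getElem ys 0 (by omega) (by omega)]
          have ht : (yi + 1).toNat = yi.toNat + 1 := by omega
          simp only [ht]
        rw [hreg xi yi (by omega) (by rw [PySem.List.len_eq]; omega)
          (by omega) (by rw [PySem.List.len_eq]; omega)]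
        rw [hgx0, hgy0]
        rw [replay_congr (pvOps instrs) xs ys hxs hys hmx hmy hn1 hm1
          (hgx0 ▸ h5) (hgx1 ▸ h6) (hgy0 ▸ h7) (hgy1 ▸ h8)]
        exact replay_eq_finalValue instrs x y
      have hyy : ∀ (xi x : Int), (kx0 : Int) ≤ xi → xi < (kx1 : Int) →
          PySem.List.pyGetD xs xi 0 ≤ x → x < PySem.List.pyGetD xs (xi + 1) 0 →
          ∀ g : PySem.Dict (Int × Int) Int,
          (PySem.List.pyRange (ky0 : Int) (ky1 : Int) 1).foldl (fun g yi =>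
              (PySem.List.pyRange (PySem.List.pyGetD ys yi 0) (PySem.List.pyGetD ys (yi + 1) 0) 1).foldl
                (fun g y => if g.contains (x, y) then g
                  else g.insert (x, y) (region.getD (xi, yi) 0)) g) g =
            ((PySem.List.pyRange i.2.1.2 (i.2.2.2 + 1) 1).map (fun y => (x, y))).foldl
              (fun g c => if g.contains c then g
                else g.insert c (pvFinalValue instrs c.1 c.2)) g := by
        intro xi x hxi1 hxi2 hx1 hx2 g
        refine Eq.trans (PySem.List.foldl_congr_mem' _ _ (fun g yi =>
            ((PySem.List.pyRange (PySem.List.pyGetD ys yi 0) (PySem.List.pyGetD ys (yi + 1) 0) 1).map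
              (fun y => (x, y))).foldl
              (fun g c => if g.contains c then g
                else g.insert c (pvFinalValue instrs c.1 c.2)) g) g ?_) ?_
        · intro yi hyi g'
          obtain ⟨hyi1, hyi2⟩ := PySem.List.mem_pyRange_one.mp hyi
          beta_reduce
          rw [List.foldl_map]
          refine PySem.List.foldl_congr_mem' _ _ _ g' ?_
          intro y hy g''
          obtain ⟨hy1, hy2⟩ := PySem.List.mem_pyRange_one.mp hy
          rw [hcell xi yi x y hxi1 hxi2 hyi1 hyi2 hx1 hx2 hy1 hy2]
        · rw [← List.foldl_flatMap, ← List.map_flatMap,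
            flat_stripes ys hys ky1 ky0 (le_of_lt hky) hky1, vy0, vy1]
      refine Eq.trans (PySem.List.foldl_congr_mem' _ _ (fun g xi =>
          ((PySem.List.pyRange (PySem.List.pyGetD xs xi 0) (PySem.List.pyGetD xs (xi + 1) 0) 1).flatMap
            (fun x => (PySem.List.pyRange i.2.1.2 (i.2.2.2 + 1) 1).map (fun y => (x, y)))).foldl
            (fun g c => if g.contains c then g
              else g.insert c (pvFinalValue instrs c.1 c.2)) g) g ?_) ?_
      · intro xi hxi g
        obtain ⟨hxi1, hxi2⟩ := PySem.List.mem_pyRange_one.mp hxi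
        refine Eq.trans (PySem.List.foldl_congr_mem' _ _ (fun g x =>
            ((PySem.List.pyRange i.2.1.2 (i.2.2.2 + 1) 1).map (fun y => (x, y))).foldl
              (fun g c => if g.contains c then g
                else g.insert c (pvFinalValue instrs c.1 c.2)) g) g ?_) ?_
        · intro x hx g'
          obtain ⟨hx1, hx2⟩ := PySem.List.mem_pyRange_one.mp hx
          exact hyy xi x hxi1 hxi2 hx1 hx2 g'
        · rw [← List.foldl_flatMap]
      · rw [← List.foldl_flatMap, ← List.flatMap_assoc,
          flat_stripes xs hxs kx1 kx0 (le_of_lt hkx) hkx1, vx0, vx1]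
        rfl
    · -- empty y-range: no cell is touched
      have hk10 : ky1 ≤ ky0 := sorted_le_reflect ys hys hky1 hky0 (by omega)
      have hnil : PySem.List.pyRange (ky0 : Int) (ky1 : Int) 1 = [] :=
        PySem.List.pyRange_one_eq_nil (by exact_mod_cast hk10)
      simp only [hnil, List.foldl_nil, PySem.List.foldl_ignore]
      have hcnil : pvCells i.2 = [] := by
        unfold pvCells
        rw [show PySem.List.pyRange i.2.1.2 (i.2.2.2 + 1) 1 = [] from
          PySem.List.pyRange_one_eq_nil (by omega)]
        simp
      rw [hcnil, List.foldl_nil]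
  · -- empty x-range: no cell is touched
    have hk10 : kx1 ≤ kx0 := sorted_le_reflect xs hxs hkx1 hkx0 (by omega)
    rw [PySem.List.pyRange_one_eq_nil (by exact_mod_cast hk10 : (kx1 : Int) ≤ (kx0 : Int)),
      List.foldl_nil]
    have hcnil : pvCells i.2 = [] := by
      unfold pvCells
      rw [PySem.List.pyRange_one_eq_nil (by omega : i.2.2.1 + 1 ≤ i.2.1.1)]
      rfl
    rw [hcnil, List.foldl_nil]

-- ===== VERDICT (by name: the statement is the Claim_ definition above) =====
theorem follow_instrs_v2_spec : Claim_equal_follow_instrs_v2 := by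
  intro instrs _
  unfold Spec_follow_instrs_v2 follow_instrs_v2
  have halt : follow_instrs_v2_alt instrs =
      (((pvOps instrs).foldl
          (pvBInstrStep (pvEdgesX (pvOps instrs)) (pvEdgesY (pvOps instrs))
            (pvRegion (pvOps instrs) (pvEdgesX (pvOps instrs)) (pvEdgesY (pvOps instrs))))
          PySem.Dict.empty).items).map (fun p => (p.1.1, p.1.2, p.2)) := rfl
  rw [halt]
  have hxs : (pvEdgesX (pvOps instrs)).Pairwise (· < ·) :=
    PySem.List.sorted_ofList_pairwise_lt _
  have hys : (pvEdgesY (pvOps instrs)).Pairwise (· < ·) :=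
    PySem.List.sorted_ofList_pairwise_lt _
  have hmx : ∀ i ∈ pvOps instrs, i.2.1.1 ∈ pvEdgesX (pvOps instrs) ∧
      i.2.2.1 + 1 ∈ pvEdgesX (pvOps instrs) := by
    intro i hi
    constructor <;>
    · rw [pvEdgesX, PySem.List.mem_sorted, PySem.Set.mem_ofList, List.mem_flatMap]
      exact ⟨i, hi, by simp⟩
  have hmy : ∀ i ∈ pvOps instrs, i.2.1.2 ∈ pvEdgesY (pvOps instrs) ∧
      i.2.2.2 + 1 ∈ pvEdgesY (pvOps instrs) := by
    intro i hi
    constructor <;>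
    · rw [pvEdgesY, PySem.List.mem_sorted, PySem.Set.mem_ofList, List.mem_flatMap]
      exact ⟨i, hi, by simp⟩
  rw [A_items instrs]
  rw [PySem.List.foldl_congr_mem' (pvOps instrs) _
    (fun g i => (pvCells i.2).foldl
      (fun g cell => if g.contains cell then g
        else g.insert cell (pvFinalValue instrs cell.1 cell.2)) g)
    PySem.Dict.empty
    (fun i hi g => bstep_eq instrs _ _ _ hxs hys hmx hmy
      (fun xi yi h1 h2 h3 h4 => region_getD _ _ _ xi yi h1 h2 h3 h4) i hi g)]
  rw [B_items (fun c => pvFinalValue instrs c.1 c.2)]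
  rw [touched_eq_touchedF instrs]
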